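-- pv_equiv track=rewrite | github.com/Colin-the/multiset | subStringGraph.py | findCommonSubSet
-- ===== SOURCE A (Python) =====
-- from itertools import combinations
--
-- def findCommonSubSet(a, b, size):
--     # edge cases
--     if size <= 0:
--         return {()}   # the “empty” subset always matches
--     if size > len(a) or size > len(b):
--         return set()  # impossible to pick size items
--
--     # generate all unique k-sized subsets (as sorted tuples) from each string
--     subs_a = {
--         tuple(sorted(chars))
--         for chars in combinations(a, size)
--     }
--     subs_b = {
--         tuple(sorted(chars))
--         for chars in combinations(b, size)
--     }
--
--     # return the intersection
--     return subs_a & subs_b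
-- ===== SOURCE B (Python) =====
-- def findCommonSubSet(a, b, size):
--     # Same edge cases as the spec: the empty subset for size<=0, impossible otherwise.
--     if size <= 0:
--         return {()}
--     if size > len(a) or size > len(b):
--         return set()
--     # A common size-k multiset uses each character at most min(count in a, count in b) times:
--     # enumerate those bounded multisets directly instead of scanning all combinations.
--     pairs = [(c, min(a.count(c), b.count(c))) for c in sorted(set(a) & set(b))]
--
--     def gen(ps, k):
--         if k == 0:
--             return [()]
--         if not ps:
--             return []
--         (c, cap), rest = ps[0], ps[1:]
--         out = []
--         for j in range(min(cap, k), -1, -1):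
--             for t in gen(rest, k - j):
--                 out.append((c,) * j + t)
--         return out
--
--     return set(gen(pairs, size))
-- ===== Notes on version B (the rewrite author's own statement) =====
-- stated objective: faster
-- what changed: B replaces A's scan of all C(n,k) index combinations (sorting each k-tuple and intersecting two sets) by counting characters once and directly enumerating the multisets with per-character multiplicity at most min(count in a, count in b).
import Mathlib
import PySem

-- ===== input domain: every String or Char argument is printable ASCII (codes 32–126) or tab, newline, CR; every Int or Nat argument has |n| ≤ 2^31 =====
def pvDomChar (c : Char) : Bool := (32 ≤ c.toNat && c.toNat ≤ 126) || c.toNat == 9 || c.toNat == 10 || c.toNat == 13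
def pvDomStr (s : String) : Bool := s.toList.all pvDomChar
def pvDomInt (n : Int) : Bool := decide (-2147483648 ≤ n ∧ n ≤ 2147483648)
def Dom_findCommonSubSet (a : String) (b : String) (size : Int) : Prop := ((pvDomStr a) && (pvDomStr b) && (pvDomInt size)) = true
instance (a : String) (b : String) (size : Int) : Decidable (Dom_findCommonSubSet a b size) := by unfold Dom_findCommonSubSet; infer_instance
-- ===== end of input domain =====

-- B replaces A's scan of all C(n,k) index combinations by direct enumeration of the
-- character multisets themselves, bounded per character by min(count in a, count in b).
-- Both Pythons return a SET of tuples; a set's iteration order is not semantic, so both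
-- ports represent the returned set canonically, in lexicographically sorted order (pvCanon).

-- ===== PORT A =====
def pvChr (c : Char) : String := String.ofList [c]

-- canonical (sorted) list representation of a returned set of char tuples
def pvCanon (xs : List (List Char)) : List (List String) :=
  (@PySem.List.sorted (List Char) (List Char) List.instLinearOrder.toLT
      LinearOrder.toDecidableLT xs (fun x => x) false).map (fun l => l.map pvChr)

def findCommonSubSet (a : String) (b : String) (size : Int) : List (List String) :=
  if size ≤ 0 then [[]]                                                -- {()}
  else if PySem.Str.len a < size ∨ PySem.Str.len b < size then []      -- set()
  else
    let subsA : PySem.Set (List Char) :=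
      PySem.Set.ofList ((PySem.List.combinations a.toList size.toNat).map
        (fun cs => PySem.List.sorted cs (fun x => x) false))
    let subsB : PySem.Set (List Char) :=
      PySem.Set.ofList ((PySem.List.combinations b.toList size.toNat).map
        (fun cs => PySem.List.sorted cs (fun x => x) false))
    pvCanon (PySem.Set.inter subsA subsB)

-- ===== PORT B =====
-- gen(ps, k) of Source B: tuples are lists of chars; `(c,)*j + t` is replicate ++ t
def genAlt : List (Char × Nat) → Nat → List (List Char)
  | _, 0 => [[]]
  | [], _+1 => []
  | (c, cap) :: rest, k+1 =>
      (PySem.List.pyRange ((min cap (k+1) : Nat) : Int) (-1) (-1)).foldl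
        (fun acc j => acc ++ (genAlt rest (k + 1 - j.toNat)).map
            (fun t => List.replicate j.toNat c ++ t)) []

def findCommonSubSet_alt (a : String) (b : String) (size : Int) : List (List String) :=
  if size ≤ 0 then [[]]
  else if PySem.Str.len a < size ∨ PySem.Str.len b < size then []
  else
    -- a.count(c) with a 1-char needle is exactly the character count: ported as List.count
    let pairs : List (Char × Nat) :=
      (PySem.List.sorted
          (PySem.Set.inter (PySem.Set.ofList a.toList) (PySem.Set.ofList b.toList))
          (fun x => x) false).map
        (fun c => (c, min (a.toList.count c) (b.toList.count c)))
    pvCanon (PySem.Set.ofList (genAlt pairs size.toNat))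

-- ===== PRECONDITION & SPEC =====
def Spec_findCommonSubSet (a : String) (b : String) (size : Int) (out : List (List String)) : Prop := out = findCommonSubSet_alt a b size
instance (a : String) (b : String) (size : Int) (out : List (List String)) : Decidable (Spec_findCommonSubSet a b size out) := by unfold Spec_findCommonSubSet; infer_instance

-- ===== CLAIM (what is proved, stated in full; the proofs are below) =====
def Claim_equal_findCommonSubSet : Prop := ∀ (a : String) (b : String) (size : Int), Dom_findCommonSubSet a b size → Spec_findCommonSubSet a b size (findCommonSubSet a b size)

-- ===== LEMMAS AND PROOFS =====

-- cap of a char in B's pair list (lookup with default 0); proof-only helper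
def capOf (pairs : List (Char × Nat)) (ch : Char) : Nat := (pairs.lookup ch).getD 0

theorem pvCanon_eq_of_perm (xs ys : List (List Char)) (h : xs.Perm ys) : pvCanon xs = pvCanon ys := by
  unfold pvCanon
  rw [(PySem.List.sorted_id_eq_sorted_id_iff_perm xs ys).2 h]

-- A's side: sorted tuples of combinations of l of length k are exactly the
-- sorted length-k lists whose counts are bounded by l's counts
theorem mem_subs (l m : List Char) (k : Nat) :
    m ∈ (PySem.List.combinations l k).map (fun cs => PySem.List.sorted cs (fun x => x) false) ↔
      (m.Pairwise (· ≤ ·) ∧ m.length = k ∧ ∀ ch, m.count ch ≤ l.count ch) := by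
  constructor
  · intro h
    obtain ⟨cs, hcs, rfl⟩ := List.mem_map.1 h
    obtain ⟨hsub, hlen⟩ := (PySem.List.mem_combinations_iff l k cs).1 hcs
    refine ⟨PySem.List.sorted_pairwise cs (fun x => x), ?_, ?_⟩
    · rw [(PySem.List.sorted_perm cs (fun x => x) false).length_eq, hlen]
    · intro ch
      rw [(PySem.List.sorted_perm cs (fun x => x) false).count_eq]
      exact hsub.count_le ch
  · rintro ⟨hp, hl, hc⟩
    have hsp : m.Subperm l := List.subperm_ext_iff.2 (fun x _ => hc x)
    obtain ⟨cs, hpc, hsl⟩ := hsp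
    refine List.mem_map.2 ⟨cs, (PySem.List.mem_combinations_iff l k cs).2 ⟨hsl, ?_⟩, ?_⟩
    · rw [hpc.length_eq, hl]
    · exact PySem.List.sorted_id_eq_of_perm_of_pairwise cs m hpc.symm hp

theorem capOf_cons (c : Char) (cap : Nat) (rest : List (Char × Nat)) (ch : Char) :
    capOf ((c, cap) :: rest) ch = if ch = c then cap else capOf rest ch := by
  unfold capOf
  by_cases h : ch = c
  · subst h; simp [List.lookup]
  · simp [List.lookup, beq_false_of_ne h, h]

theorem capOf_pos (ps : List (Char × Nat)) (ch : Char) (h : capOf ps ch ≠ 0) :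
    ∃ p ∈ ps, p.1 = ch := by
  induction ps with
  | nil => simp [capOf, List.lookup] at h
  | cons p rest ih =>
    obtain ⟨c, cap⟩ := p
    rw [capOf_cons] at h
    by_cases hc : ch = c
    · exact ⟨(c, cap), List.mem_cons_self, hc.symm⟩
    · rw [if_neg hc] at h
      obtain ⟨q, hq, hq1⟩ := ih h
      exact ⟨q, List.mem_cons_of_mem _ hq, hq1⟩

-- decompose a sorted list whose minimum is c into its c-prefix and the rest
theorem sorted_decomp (c : Char) (m : List Char) (hs : m.Pairwise (· ≤ ·))
    (hall : ∀ x ∈ m, c ≤ x) :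
    ∃ t, m = List.replicate (m.count c) c ++ t ∧ t.count c = 0 ∧
      t.Pairwise (· ≤ ·) ∧ ∀ x ∈ t, c ≤ x := by
  induction m with
  | nil => exact ⟨[], by simp⟩
  | cons x m ih =>
    obtain ⟨hx, hm⟩ := List.pairwise_cons.1 hs
    by_cases hxc : x = c
    · subst hxc
      obtain ⟨t, h1, h2, h3, h4⟩ := ih hm (fun y hy => hx y hy)
      refine ⟨t, ?_, h2, h3, h4⟩
      rw [List.count_cons_self, List.replicate_succ, List.cons_append]
      exact congrArg (x :: ·) h1
    · have hcx : c < x := lt_of_le_of_ne (hall x List.mem_cons_self) (fun h => hxc h.symm)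
      have hnot : c ∉ x :: m := by
        intro hcm
        rcases List.mem_cons.1 hcm with h | h
        · exact hxc h.symm
        · exact absurd (hx c h) (not_le.2 hcx)
      refine ⟨x :: m, ?_, List.count_eq_zero.2 hnot, hs, hall⟩
      rw [List.count_eq_zero.2 hnot]
      simp

-- B's side: genAlt enumerates exactly the sorted length-k lists with counts ≤ capOf
theorem mem_genAlt (pairs : List (Char × Nat)) (hk : pairs.Pairwise (fun p q => p.1 < q.1))
    (k : Nat) (m : List Char) :
    m ∈ genAlt pairs k ↔
      (m.Pairwise (· ≤ ·) ∧ m.length = k ∧ ∀ ch, m.count ch ≤ capOf pairs ch) := by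
  induction pairs generalizing k m with
  | nil =>
    cases k with
    | zero =>
      simp only [genAlt, List.mem_singleton]
      constructor
      · rintro rfl; exact ⟨List.Pairwise.nil, rfl, by simp [capOf, List.lookup]⟩
      · rintro ⟨_, hl, _⟩; exact List.length_eq_zero_iff.1 hl
    | succ k =>
      simp only [genAlt, List.not_mem_nil, false_iff]
      rintro ⟨_, hl, hc⟩
      cases m with
      | nil => simp at hl
      | cons x t =>
        have := hc x
        simp [capOf, List.lookup, List.count_cons_self] at this
  | cons p rest ih =>
    obtain ⟨c, cap⟩ := p
    have hrest : rest.Pairwise (fun p q => p.1 < q.1) := (List.pairwise_cons.1 hk).2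
    have hhead : ∀ q ∈ rest, c < q.1 := (List.pairwise_cons.1 hk).1
    cases k with
    | zero =>
      simp only [genAlt, List.mem_singleton]
      constructor
      · rintro rfl; exact ⟨List.Pairwise.nil, rfl, by simp⟩
      · rintro ⟨_, hl, _⟩; exact List.length_eq_zero_iff.1 hl
    | succ k =>
      have hfold : genAlt ((c, cap) :: rest) (k + 1) =
          (PySem.List.pyRange ((min cap (k + 1) : Nat) : Int) (-1) (-1)).flatMap
            (fun j => (genAlt rest (k + 1 - j.toNat)).map
              (fun t => List.replicate j.toNat c ++ t)) := by
        rw [genAlt, PySem.List.foldl_append_eq_flatMap]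
        simp
      rw [hfold, List.mem_flatMap]
      constructor
      · rintro ⟨j, hj, hmem⟩
        rw [PySem.List.mem_pyRange_neg_one] at hj
        obtain ⟨t, ht, rfl⟩ := List.mem_map.1 hmem
        have hjn : (j.toNat : Int) = j := Int.toNat_of_nonneg (by omega)
        have hntop : j.toNat ≤ min cap (k + 1) := by omega
        obtain ⟨htp, htl, htc⟩ := (ih hrest (k + 1 - j.toNat) t).1 ht
        have hgt : ∀ x ∈ t, c < x := by
          intro x hx
          have h1 : 1 ≤ t.count x := List.count_pos_iff.2 hx
          have h0 : capOf rest x ≠ 0 := by have := htc x; omega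
          obtain ⟨q, hq, hqx⟩ := capOf_pos rest x h0
          exact hqx ▸ hhead q hq
        refine ⟨?_, ?_, ?_⟩
        · rw [List.pairwise_append]
          refine ⟨List.pairwise_replicate.2 (by simp), htp, ?_⟩
          intro x hx y hy
          rw [List.eq_of_mem_replicate hx]
          exact le_of_lt (hgt y hy)
        · rw [List.length_append, List.length_replicate, htl]
          omega
        · intro ch
          rw [List.count_append, capOf_cons]
          by_cases hch : ch = c
          · subst hch
            have hct : t.count ch = 0 := by
              rw [List.count_eq_zero]
              intro hc'
              exact absurd (hgt ch hc') (lt_irrefl ch)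
            rw [if_pos rfl, hct, List.count_replicate_self]
            omega
          · rw [if_neg hch, List.count_replicate, if_neg (by simp; exact Ne.symm hch)]
            have := htc ch
            omega
      · rintro ⟨hp, hl, hc⟩
        have hall : ∀ x ∈ m, c ≤ x := by
          intro x hx
          have h1 : 1 ≤ m.count x := List.count_pos_iff.2 hx
          have h0 : capOf ((c, cap) :: rest) x ≠ 0 := by have := hc x; omega
          obtain ⟨q, hq, hqx⟩ := capOf_pos _ x h0
          rcases List.mem_cons.1 hq with rfl | hq'
          · exact le_of_eq hqx
          · exact le_of_lt (hqx ▸ hhead q hq')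
        obtain ⟨t, hmt, htc0, htp, _⟩ := sorted_decomp c m hp hall
        have hcap : m.count c ≤ cap := by
          have := hc c
          rw [capOf_cons, if_pos rfl] at this
          exact this
        have hlen : m.count c ≤ k + 1 := hl ▸ List.count_le_length
        refine ⟨(m.count c : Int), ?_, ?_⟩
        · rw [PySem.List.mem_pyRange_neg_one]
          constructor
          · omega
          · have : m.count c ≤ min cap (k + 1) := le_min hcap hlen
            omega
        · refine List.mem_map.2 ⟨t, ?_, ?_⟩
          · apply (ih hrest _ t).2
            refine ⟨htp, ?_, ?_⟩
            · have hml : m.length = m.count c + t.length := by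
                conv_lhs => rw [hmt]
                rw [List.length_append, List.length_replicate]
              omega
            · intro ch
              by_cases hch : ch = c
              · subst hch; rw [htc0]; exact Nat.zero_le _
              · have hcm : m.count ch = t.count ch := by
                  conv_lhs => rw [hmt]
                  rw [List.count_append, List.count_replicate, if_neg (by simp; exact Ne.symm hch),
                    Nat.zero_add]
                have := hc ch
                rw [capOf_cons, if_neg hch] at this
                omega
          · rw [Int.toNat_natCast]
            exact hmt.symm

theorem capOf_pairs (a b : List Char) (ch : Char) :
    capOf ((PySem.List.sorted
        (PySem.Set.inter (PySem.Set.ofList a) (PySem.Set.ofList b)) (fun x => x) false).map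
        (fun c => (c, min (a.count c) (b.count c)))) ch = min (a.count ch) (b.count ch) := by
  have hlk : ∀ (cs : List Char) (f : Char → Nat),
      capOf (cs.map (fun c => (c, f c))) ch = if ch ∈ cs then f ch else 0 := by
    intro cs f
    induction cs with
    | nil => simp [capOf]
    | cons c cs ih =>
      by_cases h : ch = c
      · subst h; simp [capOf]
      · rw [List.map_cons, capOf_cons, if_neg h, ih]
        simp [List.mem_cons, h]
  rw [hlk]
  have hmem : ch ∈ PySem.List.sorted
      (PySem.Set.inter (PySem.Set.ofList a) (PySem.Set.ofList b)) (fun x => x) false ↔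
      ch ∈ a ∧ ch ∈ b := by
    rw [PySem.List.mem_sorted, PySem.Set.mem_inter, PySem.Set.mem_ofList, PySem.Set.mem_ofList]
  by_cases h : ch ∈ a ∧ ch ∈ b
  · rw [if_pos (hmem.2 h)]
  · rw [if_neg (fun hm => h (hmem.1 hm))]
    rcases not_and_or.1 h with h' | h'
    · rw [List.count_eq_zero.2 h']; simp
    · rw [List.count_eq_zero.2 h']; simp

theorem pairs_sorted_keys (a b : List Char) :
    ((PySem.List.sorted
        (PySem.Set.inter (PySem.Set.ofList a) (PySem.Set.ofList b)) (fun x => x) false).map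
        (fun c => (c, min (a.count c) (b.count c)))).Pairwise (fun p q => p.1 < q.1) := by
  rw [List.pairwise_map]
  have hnd : (PySem.List.sorted
      (PySem.Set.inter (PySem.Set.ofList a) (PySem.Set.ofList b)) (fun x => x) false).Nodup := by
    rw [(PySem.List.sorted_perm _ _ _).nodup_iff]
    exact PySem.Set.nodup_inter _ _ (PySem.Set.nodup_ofList _)
  have hle : (PySem.List.sorted
      (PySem.Set.inter (PySem.Set.ofList a) (PySem.Set.ofList b)) (fun x => x) false).Pairwise (· ≤ ·) :=
    PySem.List.sorted_pairwise _ _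
  exact (hnd.imp_of_mem (fun _ _ => id)).and hle |>.imp
    (fun h => lt_of_le_of_ne h.2 h.1)

-- ===== VERDICT (by name: the statement is the Claim_ definition above) =====
theorem findCommonSubSet_spec : Claim_equal_findCommonSubSet := by
  intro a b size _
  unfold Spec_findCommonSubSet findCommonSubSet findCommonSubSet_alt
  split_ifs with h1 h2
  · rfl
  · rfl
  · apply pvCanon_eq_of_perm
    apply (List.perm_ext_iff_of_nodup
      (PySem.Set.nodup_inter _ _ (PySem.Set.nodup_ofList _)) (PySem.Set.nodup_ofList _)).2
    intro m
    rw [PySem.Set.mem_inter, PySem.Set.mem_ofList, PySem.Set.mem_ofList, PySem.Set.mem_ofList,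
      mem_subs, mem_subs, mem_genAlt _ (pairs_sorted_keys a.toList b.toList)]
    simp only [capOf_pairs]
    constructor
    · rintro ⟨⟨hp, hl, hca⟩, ⟨_, _, hcb⟩⟩
      exact ⟨hp, hl, fun ch => le_min (hca ch) (hcb ch)⟩
    · rintro ⟨hp, hl, hc⟩
      exact ⟨⟨hp, hl, fun ch => le_trans (hc ch) (min_le_left _ _)⟩,
        ⟨hp, hl, fun ch => le_trans (hc ch) (min_le_right _ _)⟩⟩
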